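-- pv_equiv track=rewrite | github.com/MihaneMM/self-study | taskb4.py | sum_of_segments
-- ===== SOURCE A (Python) =====
-- def sum_of_segments(matrix):
--     sum_of_segments = []
--     for i in matrix:
--         numbers =[]
--         tries = 0
--         for j in i:
--             if j > 0 and tries < 2:
--                 numbers.append(j)
--                 tries += 1
--             elif tries ==1:
--                 numbers.append(j)
--         sum_of_segments.append(sum(numbers))
--     return sum_of_segments
-- ===== SOURCE B (Python) =====
-- def sum_of_segments(matrix):
--     def tail_sum(seg):
--         # sum up to and including the next positive element; all of seg if none
--         if not seg:
--             return 0
--         x = seg[0]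
--         return x if x > 0 else x + tail_sum(seg[1:])
--
--     def row_sum(row):
--         # skip to the first positive element; 0 if there is none
--         if not row:
--             return 0
--         if row[0] > 0:
--             return row[0] + tail_sum(row[1:])
--         return row_sum(row[1:])
--
--     return [row_sum(row) for row in matrix]
-- ===== Notes on version B (the rewrite author's own statement) =====
-- stated objective: simpler
-- what changed: Replaces A's stateful flag/counter pass that accumulates a 'numbers' list per row with a direct recursive decomposition: skip to the first positive, then sum up to and including the next positive (or to the end), never building an intermediate list.
import Mathlib
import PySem

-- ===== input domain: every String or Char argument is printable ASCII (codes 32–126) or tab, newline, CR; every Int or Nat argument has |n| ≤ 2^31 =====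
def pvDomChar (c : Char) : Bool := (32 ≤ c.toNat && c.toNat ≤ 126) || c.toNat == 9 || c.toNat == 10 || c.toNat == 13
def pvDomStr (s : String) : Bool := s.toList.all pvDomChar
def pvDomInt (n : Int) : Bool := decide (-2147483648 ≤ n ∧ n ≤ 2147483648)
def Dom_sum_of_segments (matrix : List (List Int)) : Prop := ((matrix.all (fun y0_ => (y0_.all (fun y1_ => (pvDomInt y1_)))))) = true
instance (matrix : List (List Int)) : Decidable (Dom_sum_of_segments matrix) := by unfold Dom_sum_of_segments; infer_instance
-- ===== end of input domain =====

-- B replaces A's stateful flag/counter pass with a plain recursive decomposition (skip to first positive, then sum through the next positive) — objective: simpler.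


-- ===== PORT A =====
-- inner loop body: state is (numbers, tries)
def pvStepA (st : List Int × Int) (j : Int) : List Int × Int :=
  if j > 0 ∧ st.2 < 2 then (st.1 ++ [j], st.2 + 1)
  else if st.2 = 1 then (st.1 ++ [j], st.2)
  else st

def sum_of_segments (matrix : List (List Int)) : List Int :=
  matrix.foldl (fun acc i => acc ++ [(i.foldl pvStepA ([], 0)).1.sum]) []

-- ===== PORT B =====
def pvTailSum : List Int → Int
  | [] => 0
  | x :: xs => if x > 0 then x else x + pvTailSum xs

def pvRowSum : List Int → Int
  | [] => 0
  | x :: xs => if x > 0 then x + pvTailSum xs else pvRowSum xs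

def sum_of_segments_alt (matrix : List (List Int)) : List Int :=
  matrix.map pvRowSum

-- ===== PRECONDITION & SPEC =====
def Spec_sum_of_segments (matrix : List (List Int)) (out : List Int) : Prop := out = sum_of_segments_alt matrix
instance (matrix : List (List Int)) (out : List Int) : Decidable (Spec_sum_of_segments matrix out) := by unfold Spec_sum_of_segments; infer_instance

-- ===== CLAIM (what is proved, stated in full; the proofs are below) =====
def Claim_equal_sum_of_segments : Prop := ∀ (matrix : List (List Int)), Dom_sum_of_segments matrix → Spec_sum_of_segments matrix (sum_of_segments matrix)

-- ===== LEMMAS AND PROOFS =====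

-- once tries = 2, A's inner loop changes nothing
theorem pvStepA_phase2 (l ns : List Int) : l.foldl pvStepA (ns, 2) = (ns, 2) := by
  induction l generalizing ns with
  | nil => rfl
  | cons x xs ih => simp [pvStepA]; exact ih ns

-- with tries = 1, A appends everything up to and including the next positive
theorem pvStepA_phase1 (l ns : List Int) :
    (l.foldl pvStepA (ns, 1)).1.sum = ns.sum + pvTailSum l := by
  induction l generalizing ns with
  | nil => simp [pvTailSum]
  | cons x xs ih =>
    by_cases hx : x > 0
    · simp [pvStepA, hx, pvTailSum, pvStepA_phase2]
    · simp [pvStepA, hx, pvTailSum, ih (ns ++ [x])]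
      ring

-- from the initial state, A's per-row sum equals B's recursive row sum
theorem pvStepA_phase0 (l : List Int) :
    (l.foldl pvStepA ([], 0)).1.sum = pvRowSum l := by
  induction l with
  | nil => rfl
  | cons x xs ih =>
    by_cases hx : x > 0
    · simp [pvStepA, hx, pvRowSum, pvStepA_phase1]
    · simp [pvStepA, hx, pvRowSum, ih]

theorem pvFoldA_map (m : List (List Int)) (acc : List Int) :
    m.foldl (fun acc i => acc ++ [(i.foldl pvStepA ([], 0)).1.sum]) acc
      = acc ++ m.map pvRowSum := by
  induction m generalizing acc with
  | nil => simp
  | cons r rs ih =>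
    rw [List.foldl_cons, ih, pvStepA_phase0]
    simp

-- ===== VERDICT (by name: the statement is the Claim_ definition above) =====
theorem sum_of_segments_spec : Claim_equal_sum_of_segments := by
  intro matrix _
  unfold Spec_sum_of_segments sum_of_segments sum_of_segments_alt
  simpa using pvFoldA_map matrix []
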